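-- pv_equiv track=rewrite | github.com/DaivdYuan/command-kelp | src/helper.py | get_options
-- ===== SOURCE A (Python) =====
-- def get_options(args):
--     options = []
--     st = 0
--     while st < len(args):
--         if args[st].startswith("-"):
--             # get the option without "-"
--             options.append(args[st].replace("-", ""))
--         else:
--             break
--         st += 1
--     return options, st
-- ===== SOURCE B (Python) =====
-- def get_options(args):
--     # Recursive decomposition: peel one leading dash-arg, recurse on the rest,
--     # cons the stripped head and bump the stop index on the way back.
--     if args and args[0].startswith("-"):
--         opts, st = get_options(args[1:])
--         return [args[0].replace("-", "")] + opts, st + 1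
--     return [], 0
-- ===== Notes on version B (the rewrite author's own statement) =====
-- stated objective: alternative
-- what changed: Replaces A's iterative while loop with an index and a mutated accumulator by structural recursion: peel the head, recurse on the tail, and build the options list front-to-back by cons with the stop index computed on return.
import Mathlib
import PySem

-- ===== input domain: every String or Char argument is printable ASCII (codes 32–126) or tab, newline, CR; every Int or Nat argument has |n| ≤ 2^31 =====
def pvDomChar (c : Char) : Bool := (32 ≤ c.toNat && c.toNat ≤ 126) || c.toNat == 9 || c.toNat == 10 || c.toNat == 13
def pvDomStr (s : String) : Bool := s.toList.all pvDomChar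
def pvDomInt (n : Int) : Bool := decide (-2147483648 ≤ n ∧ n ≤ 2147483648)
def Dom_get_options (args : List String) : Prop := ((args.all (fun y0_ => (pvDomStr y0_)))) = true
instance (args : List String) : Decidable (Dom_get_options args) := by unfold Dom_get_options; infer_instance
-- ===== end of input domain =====

-- B replaces A's iterative accumulator loop by structural recursion that conses the
-- stripped head onto the recursive result; alternative decomposition, same cost.

-- ===== PORT A =====
-- A's while loop over args[st], testing/accumulating/breaking in one pass; the
-- remaining suffix of args plays the role of args[st:].
def get_options_loop (rest : List String) (options : List String) (st : Int) :
    List String × Int :=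
  match rest with
  | [] => (options, st)
  | a :: rs =>
    if PySem.Str.startswith a "-" then
      get_options_loop rs (options ++ [PySem.Str.replace a "-" ""]) (st + 1)
    else
      (options, st)

def get_options (args : List String) : List String × Int :=
  get_options_loop args [] 0

-- ===== PORT B =====
-- Source B: recursion — if the head starts with "-", recurse on the tail, cons the
-- stripped head and add 1 to the returned stop index; otherwise ([], 0).
def get_options_alt (args : List String) : List String × Int :=
  match args with
  | a :: rs =>
    if PySem.Str.startswith a "-" then
      let r := get_options_alt rs
      (PySem.Str.replace a "-" "" :: r.1, r.2 + 1)
    else ([], 0)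
  | [] => ([], 0)

-- ===== PRECONDITION & SPEC =====
def Spec_get_options (args : List String) (out : List String × Int) : Prop := out = get_options_alt args
instance (args : List String) (out : List String × Int) : Decidable (Spec_get_options args out) := by unfold Spec_get_options; infer_instance

-- ===== CLAIM (what is proved, stated in full; the proofs are below) =====
def Claim_equal_get_options : Prop := ∀ (args : List String), Dom_get_options args → Spec_get_options args (get_options args)

-- ===== LEMMAS AND PROOFS =====
theorem get_options_loop_eq (args : List String) :
    ∀ (opts : List String) (st : Int),
      get_options_loop args opts st =
        (opts ++ (get_options_alt args).1, st + (get_options_alt args).2) := by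
  induction args with
  | nil => intro opts st; simp [get_options_loop, get_options_alt]
  | cons a rs ih =>
    intro opts st
    by_cases h : PySem.Str.startswith a "-" <;>
      simp [PySem.Str.startswith] at h <;>
      simp [get_options_loop, get_options_alt, PySem.Str.startswith, h, ih] <;> ring

-- ===== VERDICT (by name: the statement is the Claim_ definition above) =====
theorem get_options_spec : Claim_equal_get_options := by
  intro args _
  unfold Spec_get_options get_options
  simp [get_options_loop_eq]
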